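-- pv_equiv track=rewrite | github.com/sheremans/CodeRED-Mentoring | def has_duplicate_letters(sentence):.py | has_duplicate_letters
-- ===== SOURCE A (Python) =====
-- def has_duplicate_letters(sentence):
--     # Split the sentence into words
--     words = sentence.split()
--
--     # Iterate through each word
--     for word in words:
--         # Check for duplicate letters using a set
--         letter_set = set()
--         for letter in word:
--             # If a letter is already in the set, it's a duplicate
--             if letter in letter_set:
--                 return True
--             letter_set.add(letter)
--
--     # No duplicates found in any word
--     return False
-- ===== SOURCE B (Python) =====
-- def has_duplicate_letters(sentence):
--     # Sort each word's letters; a repeated letter shows up as two equal neighbours.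
--     for word in sentence.split():
--         s = sorted(word)
--         if any(a == b for a, b in zip(s, s[1:])):
--             return True
--     return False
-- ===== Notes on version B (the rewrite author's own statement) =====
-- stated objective: alternative
-- what changed: Instead of tracking seen letters in a set with an early return, B sorts each word's letters and scans adjacent pairs for an equal neighbour, which is where any repeat must land after sorting.
import Mathlib
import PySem

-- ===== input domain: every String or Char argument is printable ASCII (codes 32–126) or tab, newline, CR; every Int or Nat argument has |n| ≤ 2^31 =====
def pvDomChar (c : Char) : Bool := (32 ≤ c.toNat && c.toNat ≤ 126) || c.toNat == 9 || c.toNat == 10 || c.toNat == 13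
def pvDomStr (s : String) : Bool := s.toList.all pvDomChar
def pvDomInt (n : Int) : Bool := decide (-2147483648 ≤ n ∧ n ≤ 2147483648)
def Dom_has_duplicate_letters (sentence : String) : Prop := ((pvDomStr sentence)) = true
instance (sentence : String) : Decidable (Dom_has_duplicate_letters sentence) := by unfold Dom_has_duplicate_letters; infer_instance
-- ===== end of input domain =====

-- B sorts each word's letters and scans adjacent pairs for an equal neighbour,
-- replacing A's seen-set with early return; an alternative algorithm, same result.

-- ===== PORT A =====
-- inner loop: for letter in word, with the accumulated letter_set; early return True
def hdlWordLoop : List Char → PySem.Set Char → Bool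
  | [], _ => false
  | letter :: rest, letter_set =>
    if PySem.Set.contains letter_set letter then true
    else hdlWordLoop rest (PySem.Set.add letter_set letter)

-- outer loop: for word in words; a True from the inner loop returns immediately
def hdlWordsLoop : List String → Bool
  | [] => false
  | word :: words =>
    if hdlWordLoop word.toList PySem.Set.empty then true
    else hdlWordsLoop words

def has_duplicate_letters (sentence : String) : Bool :=
  hdlWordsLoop (PySem.Str.split₀ sentence)

-- ===== PORT B =====
-- for word in sentence.split(): s = sorted(word); any adjacent equal pair (zip s s[1:]) → True
-- (s[1:] on a list is s.tail)
def hdlAltWords : List String → Bool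
  | [] => false
  | word :: words =>
    let s := PySem.List.sorted word.toList (fun c => c) false
    if (s.zip s.tail).any (fun p => p.1 == p.2) then true
    else hdlAltWords words

def has_duplicate_letters_alt (sentence : String) : Bool :=
  hdlAltWords (PySem.Str.split₀ sentence)

-- ===== PRECONDITION & SPEC =====
def Spec_has_duplicate_letters (sentence : String) (out : Bool) : Prop := out = has_duplicate_letters_alt sentence
instance (sentence : String) (out : Bool) : Decidable (Spec_has_duplicate_letters sentence out) := by unfold Spec_has_duplicate_letters; infer_instance

-- ===== CLAIM =====
def Claim_equal_has_duplicate_letters : Prop := ∀ (sentence : String), Dom_has_duplicate_letters sentence → Spec_has_duplicate_letters sentence (has_duplicate_letters sentence)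

-- ===== LEMMAS AND PROOFS =====

-- A's inner loop, started with a duplicate-free set, answers: does the set-so-far
-- together with the remaining letters contain a repeat?
theorem hdlWordLoop_eq (l : List Char) (s : PySem.Set Char) (hs : s.Nodup) :
    hdlWordLoop l s = !decide (List.Nodup (s ++ l)) := by
  induction l generalizing s with
  | nil => simp [hdlWordLoop, hs]
  | cons c rest ih =>
    by_cases hc : c ∈ s
    · have hcon : PySem.Set.contains s c = true := (PySem.Set.contains_iff s c).mpr hc
      simp only [hdlWordLoop, hcon, if_true]
      have : ¬ List.Nodup (s ++ c :: rest) := by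
        intro h
        exact (List.disjoint_of_nodup_append h) hc List.mem_cons_self
      simp [this]
    · have hcon : PySem.Set.contains s c = false := by
        cases h : PySem.Set.contains s c
        · rfl
        · exact absurd ((PySem.Set.contains_iff s c).mp h) hc
      have hadd : PySem.Set.add s c = s ++ [c] := by
        simp only [PySem.Set.add, hcon, Bool.false_eq_true, if_false]
      have hs' : (s ++ [c]).Nodup :=
        hs.append (List.nodup_singleton c) (by simpa using hc)
      simp only [hdlWordLoop, hcon, Bool.false_eq_true, if_false, hadd, ih _ hs']
      rw [List.append_assoc]
      rfl

-- on an ascending list, an equal adjacent pair exists exactly when the list has a repeat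
theorem adj_eq (l : List Char) (h : l.Pairwise (· ≤ ·)) :
    (l.zip l.tail).any (fun p => p.1 == p.2) = !decide (List.Nodup l) := by
  induction l with
  | nil => decide
  | cons c rest ih =>
    cases rest with
    | nil => simp
    | cons d rest' =>
      have hp' : (d :: rest').Pairwise (· ≤ ·) := h.of_cons
      have ih' := ih hp'
      by_cases hcd : c = d
      · subst hcd
        have : ¬ List.Nodup (c :: c :: rest') := by
          simp [List.nodup_cons]
        simp [List.zip, this]
      · have hlt : c < d := lt_of_le_of_ne (List.rel_of_pairwise_cons h List.mem_cons_self) hcd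
        have hnotmem : c ∉ d :: rest' := by
          intro hm
          rcases List.mem_cons.mp hm with h1 | h2
          · exact hcd h1
          · exact absurd rfl (ne_of_lt (lt_of_lt_of_le hlt (List.rel_of_pairwise_cons hp' h2)))
        have hnod : List.Nodup (c :: d :: rest') ↔ List.Nodup (d :: rest') := by
          simp [List.nodup_cons, hnotmem]
        simp only [List.tail_cons, List.zip_cons_cons, List.any_cons]
        rw [show ((d :: rest').zip rest') = ((d :: rest').zip (d :: rest').tail) from rfl, ih']
        by_cases hn : List.Nodup (d :: rest')
        · simp [hnod.mpr hn, hn, hcd]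
        · have : ¬ List.Nodup (c :: d :: rest') := fun hh => hn (hnod.mp hh)
          simp [this, hn]

-- B's per-word test equals "the word has a repeated letter"
theorem perword_eq (w : String) :
    (let s := PySem.List.sorted w.toList (fun c => c) false
     (s.zip s.tail).any (fun p => p.1 == p.2)) = !decide (List.Nodup w.toList) := by
  have hperm : (PySem.List.sorted w.toList (fun c => c) false).Perm w.toList :=
    PySem.List.sorted_perm w.toList (fun c => c) false
  have hp : (PySem.List.sorted w.toList (fun c => c) false).Pairwise (· ≤ ·) :=
    PySem.List.sorted_pairwise w.toList (fun c => c)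
  simp only
  rw [adj_eq _ hp]
  simp [hperm.nodup_iff]

theorem has_duplicate_letters_spec : Claim_equal_has_duplicate_letters := by
  intro sentence _
  unfold Spec_has_duplicate_letters has_duplicate_letters has_duplicate_letters_alt
  induction PySem.Str.split₀ sentence with
  | nil => rfl
  | cons w ws ih =>
    simp only [hdlWordsLoop, hdlAltWords]
    rw [ih, hdlWordLoop_eq w.toList PySem.Set.empty List.nodup_nil]
    have := perword_eq w
    simp only at this
    rw [this]
    by_cases h : List.Nodup w.toList <;> simp [PySem.Set.empty, h]
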